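-- pv_equiv track=rewrite | github.com/Vibenshus-Gymnasium-Programmering/Arcade_praesentationer | 09_Datatyper/simpel_roeversprogsoversaetter.py | til_roeversprog
-- ===== SOURCE A (Python) =====
-- def til_roeversprog(alm_tekst):
--     roeversprog = ""
--     for karakter in alm_tekst:
--         if karakter.lower() in "qwrtpsdfghjklzxcvbnm":
--             roeversprog += karakter +"o" + karakter
--         else:
--             roeversprog += karakter
--     return roeversprog
-- ===== SOURCE B (Python) =====
-- def til_roeversprog(alm_tekst):
--     # Segment assembly: keep non-consonant runs as whole slices of the input and
--     # insert "o"+c after each consonant; join the pieces at the end.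
--     parts = []
--     prev = 0
--     for i, c in enumerate(alm_tekst):
--         if c.lower() in "qwrtpsdfghjklzxcvbnm":
--             parts.append(alm_tekst[prev:i + 1])
--             parts.append("o" + c)
--             prev = i + 1
--     parts.append(alm_tekst[prev:])
--     return "".join(parts)
-- ===== Notes on version B (the rewrite author's own statement) =====
-- stated objective: alternative
-- what changed: Instead of appending one chunk per character to a growing string, B does segment assembly: it tracks the start of the current non-consonant run, flushes a whole input slice up to and including each consonant together with the doubled-consonant insert, and joins the collected pieces once at the end.
import Mathlib
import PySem

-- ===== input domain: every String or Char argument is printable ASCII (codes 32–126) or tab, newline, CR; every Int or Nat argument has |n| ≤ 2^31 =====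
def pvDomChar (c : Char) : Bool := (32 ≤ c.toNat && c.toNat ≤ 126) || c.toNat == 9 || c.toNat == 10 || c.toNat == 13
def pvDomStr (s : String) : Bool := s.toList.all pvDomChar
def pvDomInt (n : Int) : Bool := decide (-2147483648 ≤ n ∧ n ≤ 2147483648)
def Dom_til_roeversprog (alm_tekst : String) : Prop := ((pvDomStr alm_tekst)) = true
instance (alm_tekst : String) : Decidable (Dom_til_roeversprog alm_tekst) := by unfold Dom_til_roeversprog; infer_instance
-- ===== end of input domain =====

-- B replaces A's per-character accumulation by segment assembly: it collects whole
-- slices of the input between consonants, inserting "o"+c after each consonant,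
-- and joins the pieces once at the end (alternative decomposition).

-- ===== PORT A =====
-- the loop: for karakter in alm_tekst: append doubled or plain to the accumulator
def til_roeversprog_go (cs : List Char) (acc : List Char) : List Char :=
  match cs with
  | [] => acc
  | k :: rest =>
    if PySem.Chars.isIn (PySem.Chars.lower [k]) "qwrtpsdfghjklzxcvbnm".toList
    then til_roeversprog_go rest (acc ++ [k, 'o', k])
    else til_roeversprog_go rest (acc ++ [k])

def til_roeversprog (alm_tekst : String) : String :=
  String.ofList (til_roeversprog_go alm_tekst.toList [])

-- ===== PORT B =====
-- the loop body: for i, c in enumerate(s): if consonant, flush s[prev:i+1] and "o"+c, prev = i+1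
def pvBStep (cs : List Char) (st : List (List Char) × Int) (p : Int × Char) : List (List Char) × Int :=
  if PySem.Chars.isIn (PySem.Chars.lower [p.2]) "qwrtpsdfghjklzxcvbnm".toList
  then (st.1 ++ [PySem.List.slice cs (some st.2) (some (p.1 + 1)), ['o', p.2]], p.1 + 1)
  else st

def til_roeversprog_alt (alm_tekst : String) : String :=
  let cs := alm_tekst.toList
  let st := (PySem.List.enumerate cs 0).foldl (pvBStep cs) ([], 0)
  String.ofList ((st.1 ++ [PySem.List.slice cs (some st.2) none]).flatten)

-- ===== PRECONDITION & SPEC =====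
def Spec_til_roeversprog (alm_tekst : String) (out : String) : Prop := out = til_roeversprog_alt alm_tekst
instance (alm_tekst : String) (out : String) : Decidable (Spec_til_roeversprog alm_tekst out) := by unfold Spec_til_roeversprog; infer_instance

-- ===== CLAIM (what is proved, stated in full; the proofs are below) =====
def Claim_equal_til_roeversprog : Prop := ∀ (alm_tekst : String), Dom_til_roeversprog alm_tekst → Spec_til_roeversprog alm_tekst (til_roeversprog alm_tekst)

-- ===== LEMMAS AND PROOFS =====

-- A's per-character chunk
def pvChunkA (c : Char) : List Char :=
  if PySem.Chars.isIn (PySem.Chars.lower [c]) "qwrtpsdfghjklzxcvbnm".toList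
  then [c, 'o', c] else [c]

lemma go_append (cs : List Char) (acc : List Char) :
    til_roeversprog_go cs acc = acc ++ til_roeversprog_go cs [] := by
  induction cs generalizing acc with
  | nil => simp [til_roeversprog_go]
  | cons k rest ih =>
    simp only [til_roeversprog_go]
    split
    · rw [ih (acc ++ [k, 'o', k]), ih ([] ++ [k, 'o', k])]; simp
    · rw [ih (acc ++ [k]), ih ([] ++ [k])]; simp

lemma go_eq_flatMap (cs : List Char) :
    til_roeversprog_go cs [] = cs.flatMap pvChunkA := by
  induction cs with
  | nil => simp [til_roeversprog_go]
  | cons k rest ih =>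
    rw [List.flatMap_cons, ← ih]
    simp only [til_roeversprog_go, pvChunkA]
    split <;> rw [go_append] <;> simp

lemma extract_succ (cs : List Char) (p k : Nat) (c : Char)
    (hpk : p ≤ k) (hc : cs[k]? = some c) :
    (cs.drop p).take (k + 1 - p) = (cs.drop p).take (k - p) ++ [c] := by
  have h1 : k + 1 - p = (k - p) + 1 := by omega
  have h2 : (cs.drop p)[k - p]? = some c := by
    rw [List.getElem?_drop]
    rwa [show p + (k - p) = k by omega]
  rw [h1, List.take_add_one, h2]
  rfl

lemma b_inv (cs : List Char) : ∀ (rest : List Char) (k p : Nat) (parts : List (List Char)),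
    rest = cs.drop k → p ≤ k → k ≤ cs.length →
    ∃ (parts' : List (List Char)) (q : Nat),
      (PySem.List.enumerate rest (k : Int)).foldl (pvBStep cs) (parts, (p : Int)) = (parts', (q : Int)) ∧
      q ≤ cs.length ∧
      parts'.flatten ++ cs.drop q
        = parts.flatten ++ (cs.drop p).take (k - p) ++ (cs.drop k).flatMap pvChunkA := by
  intro rest
  induction rest with
  | nil =>
    intro k p parts hrest hpk hk
    refine ⟨parts, p, by simp [PySem.List.enumerate], by omega, ?_⟩
    have hkl : k = cs.length := by
      have := congrArg List.length hrest
      simp [List.length_drop] at this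
      omega
    rw [← hrest]
    have : (cs.drop p).take (k - p) = cs.drop p :=
      List.take_of_length_le (by simp [List.length_drop]; omega)
    rw [this]
    simp
  | cons c rest' ih =>
    intro k p parts hrest hpk hk
    have hklt : k < cs.length := by
      by_contra h
      rw [List.drop_of_length_le (by omega)] at hrest
      simp at hrest
    have hc : cs[k]? = some c := by
      have h0 : (cs.drop k)[0]? = some c := by rw [← hrest]; rfl
      rwa [List.getElem?_drop, Nat.add_zero] at h0
    have hrest' : rest' = cs.drop (k + 1) := by
      have h1 : (cs.drop k).tail = rest' := by rw [← hrest]; rfl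
      rw [← h1, List.tail_drop]
    have hdk : cs.drop k = c :: cs.drop (k + 1) := by rw [← hrest', ← hrest]
    rw [PySem.List.enumerate_cons, List.foldl_cons]
    simp only [pvBStep]
    split
    · -- consonant: flush the pending slice and "o"+c
      have hcast : ((k : Int) + 1) = ((k + 1 : Nat) : Int) := by push_cast; ring
      rw [hcast, PySem.List.slice_natCast]
      obtain ⟨parts', q, heq, hq, hinv⟩ :=
        ih (k + 1) (k + 1) (parts ++ [(cs.drop p).take (k + 1 - p), ['o', c]])
          hrest' (le_refl _) (by omega)
      refine ⟨parts', q, heq, hq, ?_⟩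
      rw [hinv, extract_succ cs p k c hpk hc]
      have hch : pvChunkA c = [c, 'o', c] := by simp only [pvChunkA]; rw [if_pos ‹_›]
      rw [hdk, List.flatMap_cons, hch]
      simp
    · -- not a consonant: state unchanged
      obtain ⟨parts', q, heq, hq, hinv⟩ := ih (k + 1) p parts hrest' (by omega) (by omega)
      refine ⟨parts', q, heq, hq, ?_⟩
      rw [hinv, extract_succ cs p k c hpk hc]
      have hch : pvChunkA c = [c] := by simp only [pvChunkA]; rw [if_neg ‹_›]
      rw [hdk, List.flatMap_cons, hch]
      simp

-- ===== VERDICT (by name: the statement is the Claim_ definition above) =====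
theorem til_roeversprog_spec : Claim_equal_til_roeversprog := by
  intro s _
  unfold Spec_til_roeversprog til_roeversprog til_roeversprog_alt
  dsimp only
  obtain ⟨parts', q, heq, hq, hinv⟩ :=
    b_inv s.toList s.toList 0 0 [] rfl (le_refl _) (Nat.zero_le _)
  simp only [Nat.cast_zero] at heq
  rw [go_eq_flatMap, heq]
  simp only [List.flatten_append, List.flatten_cons, List.flatten_nil, List.append_nil]
  rw [PySem.List.slice_from_natCast]
  rw [hinv]
  simp
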